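-- pv_equiv track=rewrite | github.com/cryptograss/blue-railroad-import | blue_railroad_import/release_page.py | _canonical_track_cid
-- ===== SOURCE A (Python) =====
-- from typing import Optional
--
-- def _canonical_track_cid(track: dict) -> tuple[Optional[str], Optional[str]]:
--     """Pick the canonical (cid, format) for a track.
--
--     FLAC is preferred (lossless, archival source). Falls back to OGG, then
--     the first encoding alphabetically. Returns (None, None) if no encoding
--     has a CID.
--     """
--     encodings = track.get('encodings') or {}
--     for fmt in ('flac', 'ogg', 'wav', 'm4a', 'mp3'):
--         cid = (encodings.get(fmt) or {}).get('cid')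
--         if cid:
--             return cid, fmt
--     for fmt, enc in sorted(encodings.items()):
--         if enc.get('cid'):
--             return enc['cid'], fmt
--     return None, None
-- ===== SOURCE B (Python) =====
-- from typing import Optional
--
-- _RANK = {'flac': 0, 'ogg': 1, 'wav': 2, 'm4a': 3, 'mp3': 4}
--
-- def _canonical_track_cid(track: dict) -> tuple[Optional[str], Optional[str]]:
--     """Pick the canonical (cid, format) for a track by a single ranked min-selection."""
--     encodings = track.get('encodings') or {}
--     candidates = [(fmt, enc.get('cid')) for fmt, enc in encodings.items() if enc.get('cid')]
--     if not candidates: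
--         return None, None
--     fmt, cid = min(candidates, key=lambda c: (_RANK.get(c[0], len(_RANK)), c[0]))
--     return cid, fmt
-- ===== Notes on version B (the rewrite author's own statement) =====
-- stated objective: simpler
-- what changed: A's five-step preference loop followed by a sort-then-scan fallback is replaced by one candidate-collection pass and a single min-selection under a unified (rank, format) key, with no sorting.
import Mathlib
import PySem

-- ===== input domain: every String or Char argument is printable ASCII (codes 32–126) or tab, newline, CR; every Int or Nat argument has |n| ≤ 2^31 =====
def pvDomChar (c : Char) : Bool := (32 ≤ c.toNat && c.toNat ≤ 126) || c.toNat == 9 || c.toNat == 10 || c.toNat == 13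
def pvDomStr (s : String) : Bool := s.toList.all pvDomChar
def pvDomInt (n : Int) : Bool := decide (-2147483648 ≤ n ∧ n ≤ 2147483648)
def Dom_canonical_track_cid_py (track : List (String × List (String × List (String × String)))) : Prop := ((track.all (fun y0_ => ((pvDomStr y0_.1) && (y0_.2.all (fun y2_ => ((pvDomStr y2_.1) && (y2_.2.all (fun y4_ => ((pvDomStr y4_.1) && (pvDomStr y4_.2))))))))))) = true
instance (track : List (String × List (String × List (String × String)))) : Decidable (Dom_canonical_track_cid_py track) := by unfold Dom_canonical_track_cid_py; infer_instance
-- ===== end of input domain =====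

-- B replaces A's preference loop plus sorted fallback scan by one candidate pass and a single
-- ranked min-selection (objective: simpler decomposition, no sort).


-- ===== PORT A =====
-- first loop: for fmt in ('flac','ogg','wav','m4a','mp3'): cid = (encodings.get(fmt) or {}).get('cid'); if cid: return cid, fmt
def pvLoopPref (encs : PySem.Dict String (List (String × String))) :
    List String → Option (String × String)
  | [] => none
  | fmt :: rest =>
    match (PySem.Dict.mk ((encs.get? fmt).getD [])).get? "cid" with
    | some c => if c = "" then pvLoopPref encs rest else some (c, fmt)
    | none => pvLoopPref encs rest

-- second loop: for fmt, enc in sorted(encodings.items()): if enc.get('cid'): return enc['cid'], fmt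
def pvLoopSorted : List (String × List (String × String)) → Option (String × String)
  | [] => none
  | (fmt, enc) :: rest =>
    match (PySem.Dict.mk enc).get? "cid" with
    | some c => if c = "" then pvLoopSorted rest else some (c, fmt)
    | none => pvLoopSorted rest

-- sorted(encodings.items()) compares (key, value) tuples, but a dict's keys are distinct, so
-- Python orders by the key alone; ported as a sort keyed on the first component (exact there).
def canonical_track_cid_py (track : List (String × List (String × List (String × String)))) : Option String × Option String :=
  let encodings : PySem.Dict String (List (String × String)) :=
    PySem.Dict.mk (((PySem.Dict.mk track).get? "encodings").getD [])
  match pvLoopPref encodings ["flac", "ogg", "wav", "m4a", "mp3"] with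
  | some (c, f) => (some c, some f)
  | none =>
    match pvLoopSorted (PySem.List.sorted encodings.items (fun p => p.1)) with
    | some (c, f) => (some c, some f)
    | none => (none, none)

-- ===== PORT B =====
def pvRankB : PySem.Dict String Int :=
  PySem.Dict.mk [("flac", 0), ("ogg", 1), ("wav", 2), ("m4a", 3), ("mp3", 4)]

def canonical_track_cid_py_alt (track : List (String × List (String × List (String × String)))) : Option String × Option String :=
  let encodings : PySem.Dict String (List (String × String)) :=
    PySem.Dict.mk (((PySem.Dict.mk track).get? "encodings").getD [])
  -- candidates = [(fmt, enc.get('cid')) for fmt, enc in encodings.items() if enc.get('cid')]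
  let candidates := encodings.items.filterMap (fun p =>
    match (PySem.Dict.mk p.2).get? "cid" with
    | some c => if c = "" then none else some (p.1, c)
    | none => none)
  -- min(candidates, key=lambda c: (_RANK.get(c[0], len(_RANK)), c[0]));  len(_RANK) = 5
  match PySem.List.min2? candidates (fun c => pvRankB.getD c.1 5) (fun c => c.1) with
  | some m => (some m.2, some m.1)
  | none => (none, none)

-- ===== PRECONDITION & SPEC =====
-- Pre_ excludes tracks whose 'encodings' association list carries a duplicate format key — a
-- shape no Python dict can represent, on which first-match lookup vs ranked selection order is
-- an accidental corner of the list encoding.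
def Pre_canonical_track_cid_py (track : List (String × List (String × List (String × String)))) : Prop :=
  ((((PySem.Dict.mk track).get? "encodings").getD []).map Prod.fst).Nodup
instance (track : List (String × List (String × List (String × String)))) : Decidable (Pre_canonical_track_cid_py track) := by unfold Pre_canonical_track_cid_py; infer_instance

def pvWitness_canonical_track_cid_py : (List (String × List (String × List (String × String)))) :=
  [("encodings", [("mp3", [("cid", "Qm1")]), ("aac", [("cid", "Qm2")])])]

def Spec_canonical_track_cid_py (track : List (String × List (String × List (String × String)))) (out : Option String × Option String) : Prop := out = canonical_track_cid_py_alt track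
instance (track : List (String × List (String × List (String × String)))) (out : Option String × Option String) : Decidable (Spec_canonical_track_cid_py track out) := by unfold Spec_canonical_track_cid_py; infer_instance

-- ===== CLAIM (what is proved, stated in full; the proofs are below) =====
def Claim_equal_canonical_track_cid_py : Prop := ∀ (track : List (String × List (String × List (String × String)))), Dom_canonical_track_cid_py track → Pre_canonical_track_cid_py track → Spec_canonical_track_cid_py track (canonical_track_cid_py track)

-- ===== LEMMAS AND PROOFS =====

-- truthy cid of one encoding dict: some c with c ≠ "" iff Python's `if cid:` fires
def pvCidOf (enc : List (String × String)) : Option String :=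
  match (PySem.Dict.mk enc).get? "cid" with
  | some c => if c = "" then none else some c
  | none => none

-- B's candidate list, in proof-friendly form
def pvCand (es : List (String × List (String × String))) : List (String × String) :=
  es.filterMap (fun p => (pvCidOf p.2).map (fun c => (p.1, c)))

def pvRankD (f : String) : Int := pvRankB.getD f 5

-- lexicographic "≤" / "<" on the (rank, fmt) key of B's min-selection
def pvKeyLe (a b : String × String) : Prop :=
  pvRankD a.1 < pvRankD b.1 ∨ (pvRankD a.1 = pvRankD b.1 ∧ a.1 ≤ b.1)

def pvKeyLt (a b : String × String) : Prop :=
  pvRankD a.1 < pvRankD b.1 ∨ (pvRankD a.1 = pvRankD b.1 ∧ a.1 < b.1)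

theorem pvRankD_eq (f : String) :
    pvRankD f = if f = "flac" then 0 else if f = "ogg" then 1 else if f = "wav" then 2
      else if f = "m4a" then 3 else if f = "mp3" then 4 else 5 := by
  simp only [pvRankD, pvRankB, PySem.Dict.getD, PySem.Dict.get?_mk_cons, beq_iff_eq]
  by_cases h1 : f = "flac" <;> by_cases h2 : f = "ogg" <;> by_cases h3 : f = "wav" <;>
    by_cases h4 : f = "m4a" <;> by_cases h5 : f = "mp3" <;>
    simp [h1, h2, h3, h4, h5, eq_comm]
  rfl

theorem pvCand_eq (es : List (String × List (String × String))) :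
    (es.filterMap (fun p =>
      match (PySem.Dict.mk p.2).get? "cid" with
      | some c => if c = "" then none else some (p.1, c)
      | none => none)) = pvCand es := by
  unfold pvCand
  apply List.filterMap_congr
  intro p _
  unfold pvCidOf
  cases h : (PySem.Dict.mk p.2).get? "cid" with
  | none => simp
  | some c => by_cases hc : c = "" <;> simp [hc]

theorem pvCand_fst_sublist (es : List (String × List (String × String))) :
    ((pvCand es).map Prod.fst).Sublist (es.map Prod.fst) := by
  induction es with
  | nil => simp [pvCand]
  | cons p t ih =>
    unfold pvCand at ih ⊢
    rw [List.filterMap_cons, List.map_cons]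
    cases h : (pvCidOf p.2).map (fun c => (p.1, c)) with
    | none => exact ih.trans (List.sublist_cons_self _ _)
    | some q =>
      obtain ⟨c, hc, rfl⟩ := Option.map_eq_some_iff.mp h
      rw [List.map_cons]
      exact ih.cons₂ p.1

theorem pvNodup_pair_eq {l : List (String × String)} (hnd : (l.map Prod.fst).Nodup)
    {a b : String × String} (ha : a ∈ l) (hb : b ∈ l) (h : a.1 = b.1) : a = b := by
  induction l with
  | nil => cases ha
  | cons x t ih =>
    simp only [List.map_cons, List.nodup_cons] at hnd
    rcases List.mem_cons.mp ha with rfl | ha' <;> rcases List.mem_cons.mp hb with rfl | hb'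
    · rfl
    · exact absurd (h ▸ List.mem_map_of_mem hb') hnd.1
    · exact absurd (h ▸ List.mem_map_of_mem ha') hnd.1
    · exact ih hnd.2 ha' hb'

theorem pvLoopPref_cons (d : PySem.Dict String (List (String × String))) (f : String) (rest : List String) :
    pvLoopPref d (f :: rest) =
      match pvCidOf ((d.get? f).getD []) with
      | some c => some (c, f)
      | none => pvLoopPref d rest := by
  show (match (PySem.Dict.mk ((d.get? f).getD [])).get? "cid" with
    | some c => if c = "" then pvLoopPref d rest else some (c, f)
    | none => pvLoopPref d rest) = _
  unfold pvCidOf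
  cases h : (PySem.Dict.mk ((d.get? f).getD [])).get? "cid" with
  | none => simp
  | some c => by_cases hc : c = "" <;> simp [hc]

theorem pvLoopSorted_cons (p : String × List (String × String)) (rest : List (String × List (String × String))) :
    pvLoopSorted (p :: rest) =
      match pvCidOf p.2 with
      | some c => some (c, p.1)
      | none => pvLoopSorted rest := by
  obtain ⟨f, enc⟩ := p
  show (match (PySem.Dict.mk enc).get? "cid" with
    | some c => if c = "" then pvLoopSorted rest else some (c, f)
    | none => pvLoopSorted rest) = _
  unfold pvCidOf
  cases h : (PySem.Dict.mk enc).get? "cid" with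
  | none => simp
  | some c => by_cases hc : c = "" <;> simp [hc]

theorem pvMem_cand {es : List (String × List (String × String))}
    (hnd : (es.map Prod.fst).Nodup) (f c : String) :
    (f, c) ∈ pvCand es ↔ pvCidOf (((PySem.Dict.mk es).get? f).getD []) = some c := by
  have hkeys : (PySem.Dict.mk es).keys.Nodup := by simpa [PySem.Dict.keys] using hnd
  unfold pvCand
  rw [List.mem_filterMap]
  constructor
  · rintro ⟨⟨g, enc⟩, hmem, heq⟩
    obtain ⟨c', hc', heq2⟩ := Option.map_eq_some_iff.mp heq
    have heq2' : (g, c') = (f, c) := heq2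
    injection heq2' with h1 h2
    subst h1; subst h2
    have hg : (PySem.Dict.mk es).get? g = some enc :=
      PySem.Dict.get?_of_mem_items _ hmem hkeys
    rw [hg]
    exact hc'
  · intro h
    cases hq : (PySem.Dict.mk es).get? f with
    | none =>
      rw [hq] at h
      simp only [Option.getD_none] at h
      have hnil : pvCidOf [] = none := rfl
      rw [hnil] at h
      cases h
    | some enc =>
      refine ⟨(f, enc), PySem.Dict.mem_items_of_get?_eq_some _ hq, ?_⟩
      rw [hq] at h
      simp only [Option.getD_some] at h
      simp [h]

theorem pvKeyLe_refl (a : String × String) : pvKeyLe a a := Or.inr ⟨rfl, le_refl _⟩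

theorem pvKeyLe_trans {a b c : String × String} (h1 : pvKeyLe a b) (h2 : pvKeyLe b c) :
    pvKeyLe a c := by
  rcases h1 with h1 | ⟨h1, h1'⟩ <;> rcases h2 with h2 | ⟨h2, h2'⟩
  · exact Or.inl (h1.trans h2)
  · exact Or.inl (h2 ▸ h1)
  · exact Or.inl (h1 ▸ h2)
  · exact Or.inr ⟨h1.trans h2, h1'.trans h2'⟩

theorem pvKeyLe_of_lt {a b : String × String} (h : pvKeyLt a b) : pvKeyLe a b := by
  rcases h with h | ⟨h, h'⟩
  · exact Or.inl h
  · exact Or.inr ⟨h, le_of_lt h'⟩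

theorem pvNot_keyLt {a b : String × String} (h : ¬ pvKeyLt a b) : pvKeyLe b a := by
  unfold pvKeyLt at h
  unfold pvKeyLe
  rcases lt_trichotomy (pvRankD a.1) (pvRankD b.1) with h1 | h1 | h1
  · exact absurd (Or.inl h1) h
  · refine Or.inr ⟨h1.symm, ?_⟩
    by_contra hg
    exact h (Or.inr ⟨h1, not_le.mp hg⟩)
  · exact Or.inl h1

def pvStep (acc : Option (String × String)) (x : String × String) : Option (String × String) :=
  match acc with
  | none => some x
  | some m =>
    if (decide (pvRankD x.1 < pvRankD m.1) ||
        (!decide (pvRankD m.1 < pvRankD x.1) && decide (x.1 < m.1))) = true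
    then some x else some m

theorem pvStep_some_pos {x m : String × String} (hb : pvKeyLt x m) :
    pvStep (some m) x = some x := by
  show (if (decide (pvRankD x.1 < pvRankD m.1) ||
      (!decide (pvRankD m.1 < pvRankD x.1) && decide (x.1 < m.1))) = true
    then some x else some m) = _
  · refine if_pos ?_
    simp only [Bool.or_eq_true, Bool.and_eq_true, Bool.not_eq_true', decide_eq_true_eq,
      decide_eq_false_iff_not]
    rcases hb with h | ⟨h1, h2⟩
    · exact Or.inl h
    · exact Or.inr ⟨by omega, h2⟩

theorem pvStep_some_neg {x m : String × String} (hb : ¬ pvKeyLt x m) :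
    pvStep (some m) x = some m := by
  show (if (decide (pvRankD x.1 < pvRankD m.1) ||
      (!decide (pvRankD m.1 < pvRankD x.1) && decide (x.1 < m.1))) = true
    then some x else some m) = _
  · refine if_neg ?_
    simp only [Bool.or_eq_true, Bool.and_eq_true, Bool.not_eq_true', decide_eq_true_eq,
      decide_eq_false_iff_not]
    rintro (h | ⟨h1, h2⟩)
    · exact hb (Or.inl h)
    · rcases lt_trichotomy (pvRankD x.1) (pvRankD m.1) with h3 | h3 | h3
      · exact hb (Or.inl h3)
      · exact hb (Or.inr ⟨h3, h2⟩)
      · exact h1 h3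

theorem pvMin2_eq_foldl (xs : List (String × String)) :
    PySem.List.min2? xs (fun c => pvRankB.getD c.1 5) (fun c => c.1) = xs.foldl pvStep none := by
  unfold PySem.List.min2?
  apply List.foldl_ext
  intro acc x _
  cases acc <;> rfl

theorem pvFoldMin_aux (t : List (String × String)) :
    ∀ m : String × String,
    ∃ m', t.foldl pvStep (some m) = some m' ∧ (m' = m ∨ m' ∈ t) ∧ pvKeyLe m' m ∧
      ∀ y ∈ t, pvKeyLe m' y := by
  induction t with
  | nil => exact fun m => ⟨m, rfl, Or.inl rfl, pvKeyLe_refl m, by simp⟩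
  | cons x t ih =>
    intro m
    simp only [List.foldl_cons]
    by_cases hb : pvKeyLt x m
    · rw [pvStep_some_pos hb]
      obtain ⟨m', hfold, hmem, hle, hall⟩ := ih x
      refine ⟨m', hfold, ?_, pvKeyLe_trans hle (pvKeyLe_of_lt hb), ?_⟩
      · rcases hmem with rfl | hm
        · exact Or.inr List.mem_cons_self
        · exact Or.inr (List.mem_cons_of_mem _ hm)
      · intro y hy
        rcases List.mem_cons.mp hy with rfl | hy'
        · exact hle
        · exact hall y hy'
    · rw [pvStep_some_neg hb]
      obtain ⟨m', hfold, hmem, hle, hall⟩ := ih m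
      refine ⟨m', hfold, ?_, hle, ?_⟩
      · rcases hmem with rfl | hm
        · exact Or.inl rfl
        · exact Or.inr (List.mem_cons_of_mem _ hm)
      · intro y hy
        rcases List.mem_cons.mp hy with rfl | hy'
        · exact pvKeyLe_trans hle (pvNot_keyLt hb)
        · exact hall y hy'

theorem pvMin2_spec (xs : List (String × String)) (m : String × String)
    (h : PySem.List.min2? xs (fun c => pvRankB.getD c.1 5) (fun c => c.1) = some m) :
    m ∈ xs ∧ ∀ y ∈ xs, pvKeyLe m y := by
  rw [pvMin2_eq_foldl] at h
  cases xs with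
  | nil => cases h
  | cons x t =>
    obtain ⟨m', hfold, hmem, hle, hall⟩ := pvFoldMin_aux t x
    rw [List.foldl_cons] at h
    have hstep : pvStep none x = some x := rfl
    rw [hstep, hfold] at h
    injection h with h; subst h
    refine ⟨?_, ?_⟩
    · rcases hmem with rfl | hm
      · exact List.mem_cons_self
      · exact List.mem_cons_of_mem _ hm
    · intro y hy
      rcases List.mem_cons.mp hy with rfl | hy'
      · exact hle
      · exact hall y hy'

theorem pvMin2_isSome (xs : List (String × String)) (hne : xs ≠ []) :
    ∃ m, PySem.List.min2? xs (fun c => pvRankB.getD c.1 5) (fun c => c.1) = some m := by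
  cases xs with
  | nil => exact absurd rfl hne
  | cons x t =>
    obtain ⟨m', hfold, _, _, _⟩ := pvFoldMin_aux t x
    refine ⟨m', ?_⟩
    rw [pvMin2_eq_foldl, List.foldl_cons]
    have hstep : pvStep none x = some x := rfl
    rw [hstep]
    exact hfold

theorem pvMin2_eq_some {xs : List (String × String)} {m : String × String}
    (hnd : (xs.map Prod.fst).Nodup) (hm : m ∈ xs) (hmin : ∀ y ∈ xs, pvKeyLe m y) :
    PySem.List.min2? xs (fun c => pvRankB.getD c.1 5) (fun c => c.1) = some m := by
  obtain ⟨m', hm'⟩ := pvMin2_isSome xs (by rintro rfl; cases hm)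
  obtain ⟨hmem', hall'⟩ := pvMin2_spec xs m' hm'
  have h1 := hmin m' hmem'
  have h2 := hall' m hm
  have hfst : m.1 = m'.1 := by
    rcases h1 with h1 | ⟨h1a, h1b⟩ <;> rcases h2 with h2 | ⟨h2a, h2b⟩ <;>
      first | omega | exact le_antisymm h1b h2b
  rw [hm', pvNodup_pair_eq hnd hmem' hm hfst.symm]

theorem pvCand_cons (p : String × List (String × String)) (t : List (String × List (String × String))) :
    pvCand (p :: t) =
      match pvCidOf p.2 with
      | some c => (p.1, c) :: pvCand t
      | none => pvCand t := by
  unfold pvCand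
  rw [List.filterMap_cons]
  cases h : pvCidOf p.2 with
  | none => simp
  | some c => simp

theorem pvLoopSorted_none {l : List (String × List (String × String))}
    (h : pvLoopSorted l = none) : pvCand l = [] := by
  induction l with
  | nil => rfl
  | cons p t ih =>
    rw [pvLoopSorted_cons] at h
    rw [pvCand_cons]
    cases hc : pvCidOf p.2 with
    | none => rw [hc] at h; exact ih h
    | some c => rw [hc] at h; cases h

theorem pvLoopSorted_some {l : List (String × List (String × String))} {c f : String}
    (hp : l.Pairwise (fun a b => a.1 < b.1)) (h : pvLoopSorted l = some (c, f)) :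
    (f, c) ∈ pvCand l ∧ ∀ p ∈ pvCand l, f ≤ p.1 := by
  induction l with
  | nil => cases h
  | cons p t ih =>
    rw [pvLoopSorted_cons] at h
    rw [pvCand_cons]
    cases hc : pvCidOf p.2 with
    | some c0 =>
      rw [hc] at h
      injection h with h
      injection h with h1 h2
      subst h1; subst h2
      refine ⟨List.mem_cons_self, ?_⟩
      intro q hq
      rcases List.mem_cons.mp hq with rfl | hq'
      · exact le_refl _
      · -- q ∈ pvCand t, so q.1 is the fst of some element of t, and p.1 < it
        have hsub := pvCand_fst_sublist t
        have : q.1 ∈ t.map Prod.fst := hsub.mem (List.mem_map_of_mem hq')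
        obtain ⟨r, hr, hrq⟩ := List.mem_map.mp this
        have := (List.pairwise_cons.mp hp).1 r hr
        exact le_of_lt (hrq ▸ this)
    | none =>
      rw [hc] at h
      obtain ⟨hmem, hall⟩ := ih (List.pairwise_cons.mp hp).2 h
      exact ⟨hmem, fun q hq => hall q hq⟩

theorem pvRankD_lt_five_inj {a b : String} (h5 : pvRankD a < 5) (h : pvRankD a = pvRankD b) :
    a = b := by
  rw [pvRankD_eq] at h5
  rw [pvRankD_eq, pvRankD_eq] at h
  split_ifs at h5 h <;> simp_all

theorem pvLeafMin {es : List (String × List (String × String))}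
    (hnd : (es.map Prod.fst).Nodup) (f c : String) (i : Int) (hi : i < 5)
    (hv : pvRankD f = i)
    (hf : pvCidOf (((PySem.Dict.mk es).get? f).getD []) = some c)
    (hlow : ∀ g : String, pvRankD g < i →
      pvCidOf (((PySem.Dict.mk es).get? g).getD []) = none) :
    PySem.List.min2? (pvCand es) (fun c => pvRankB.getD c.1 5) (fun c => c.1) = some (f, c) := by
  have hnd' : ((pvCand es).map Prod.fst).Nodup := (pvCand_fst_sublist es).nodup hnd
  have hmem : (f, c) ∈ pvCand es := (pvMem_cand hnd _ _).mpr hf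
  apply pvMin2_eq_some hnd' hmem
  intro y hy
  have hy' : pvCidOf (((PySem.Dict.mk es).get? y.1).getD []) = some y.2 :=
    (pvMem_cand hnd y.1 y.2).mp (by simpa using hy)
  by_cases hyf : y.1 = f
  · rw [pvNodup_pair_eq hnd' hy hmem (by rw [hyf])]
    exact pvKeyLe_refl _
  · left
    rw [hv]
    rcases lt_trichotomy (pvRankD y.1) i with hlt | heq | hgt
    · rw [hlow y.1 hlt] at hy'
      cases hy'
    · exact absurd (pvRankD_lt_five_inj (by omega) (heq.trans hv.symm)) hyf
    · exact hgt

theorem pvMain (es : List (String × List (String × String))) (hnd : (es.map Prod.fst).Nodup) :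
    (match pvLoopPref (PySem.Dict.mk es) ["flac", "ogg", "wav", "m4a", "mp3"] with
     | some (c, f) => ((some c, some f) : Option String × Option String)
     | none =>
       match pvLoopSorted (PySem.List.sorted es (fun p => p.1)) with
       | some (c, f) => (some c, some f)
       | none => (none, none)) =
    (match PySem.List.min2? (pvCand es) (fun c => pvRankB.getD c.1 5) (fun c => c.1) with
     | some m => (some m.2, some m.1)
     | none => (none, none)) := by
  have hnd' : ((pvCand es).map Prod.fst).Nodup := (pvCand_fst_sublist es).nodup hnd
  rw [pvLoopPref_cons, pvLoopPref_cons, pvLoopPref_cons, pvLoopPref_cons, pvLoopPref_cons]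
  cases h1 : pvCidOf (((PySem.Dict.mk es).get? "flac").getD []) with
  | some c =>
    rw [pvLeafMin hnd "flac" c 0 (by omega) (by decide) h1 (fun g hg => by
      rw [pvRankD_eq] at hg; split_ifs at hg <;> omega)]
  | none =>
  cases h2 : pvCidOf (((PySem.Dict.mk es).get? "ogg").getD []) with
  | some c =>
    rw [pvLeafMin hnd "ogg" c 1 (by omega) (by decide) h2 (fun g hg => by
      rw [pvRankD_eq] at hg
      split_ifs at hg with a1 <;> first | (subst a1; exact h1) | omega)]
  | none =>
  cases h3 : pvCidOf (((PySem.Dict.mk es).get? "wav").getD []) with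
  | some c =>
    rw [pvLeafMin hnd "wav" c 2 (by omega) (by decide) h3 (fun g hg => by
      rw [pvRankD_eq] at hg
      split_ifs at hg with a1 a2 <;>
        first | (subst a1; exact h1) | (subst a2; exact h2) | omega)]
  | none =>
  cases h4 : pvCidOf (((PySem.Dict.mk es).get? "m4a").getD []) with
  | some c =>
    rw [pvLeafMin hnd "m4a" c 3 (by omega) (by decide) h4 (fun g hg => by
      rw [pvRankD_eq] at hg
      split_ifs at hg with a1 a2 a3 <;>
        first | (subst a1; exact h1) | (subst a2; exact h2) | (subst a3; exact h3) | omega)]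
  | none =>
  cases h5 : pvCidOf (((PySem.Dict.mk es).get? "mp3").getD []) with
  | some c =>
    rw [pvLeafMin hnd "mp3" c 4 (by omega) (by decide) h5 (fun g hg => by
      rw [pvRankD_eq] at hg
      split_ifs at hg with a1 a2 a3 a4 <;>
        first | (subst a1; exact h1) | (subst a2; exact h2) | (subst a3; exact h3) |
          (subst a4; exact h4) | omega)]
  | none =>
  -- all preferred formats are cid-less: ranking degenerates to the alphabetical minimum
  have hperm : (pvCand (PySem.List.sorted es (fun p => p.1))).Perm (pvCand es) :=
    (PySem.List.sorted_perm es (fun p => p.1) false).filterMap _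
  have hnone : ∀ g : String, pvRankD g < 5 →
      pvCidOf (((PySem.Dict.mk es).get? g).getD []) = none := fun g hg => by
    rw [pvRankD_eq] at hg
    split_ifs at hg with a1 a2 a3 a4 a5 <;>
      first | (subst a1; exact h1) | (subst a2; exact h2) | (subst a3; exact h3) |
        (subst a4; exact h4) | (subst a5; exact h5) | omega
  cases hs : pvLoopSorted (PySem.List.sorted es (fun p => p.1)) with
  | none =>
    have hcand : pvCand es = [] := by
      have := pvLoopSorted_none hs
      exact ((this ▸ hperm).symm).eq_nil
    rw [hcand]
    rfl
  | some p =>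
    obtain ⟨c, f⟩ := p
    -- sortedness with distinct keys is strict on the first components
    have hple : (PySem.List.sorted es (fun p => p.1)).Pairwise (fun a b => a.1 ≤ b.1) :=
      PySem.List.sorted_pairwise es (fun p => p.1)
    have hndS : ((PySem.List.sorted es (fun p => p.1)).map Prod.fst).Nodup :=
      (((PySem.List.sorted_perm es (fun p => p.1) false).map Prod.fst).nodup_iff).mpr hnd
    have hpne : (PySem.List.sorted es (fun p => p.1)).Pairwise (fun a b => a.1 ≠ b.1) :=
      List.pairwise_map.mp hndS
    have hplt : (PySem.List.sorted es (fun p => p.1)).Pairwise (fun a b => a.1 < b.1) := by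
      refine (hple.and hpne).imp ?_
      rintro a b ⟨hab1, hab2⟩
      exact lt_of_le_of_ne hab1 hab2
    obtain ⟨hmemS, hallS⟩ := pvLoopSorted_some hplt hs
    have hmem : (f, c) ∈ pvCand es := hperm.subset hmemS
    have hrank5 : ∀ y : String × String, y ∈ pvCand es → pvRankD y.1 = 5 := by
      intro y hy
      have hy' : pvCidOf (((PySem.Dict.mk es).get? y.1).getD []) = some y.2 :=
        (pvMem_cand hnd y.1 y.2).mp (by simpa using hy)
      by_contra hne
      have hlt : pvRankD y.1 < 5 := by
        rw [pvRankD_eq] at hne ⊢; split_ifs at hne ⊢ <;> omega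
      rw [hnone y.1 hlt] at hy'
      cases hy'
    have hminC : PySem.List.min2? (pvCand es) (fun c => pvRankB.getD c.1 5) (fun c => c.1)
        = some (f, c) := by
      apply pvMin2_eq_some hnd' hmem
      intro y hy
      right
      refine ⟨?_, ?_⟩
      · rw [hrank5 _ hmem, hrank5 _ hy]
      · exact hallS y (hperm.mem_iff.mpr hy)
    rw [hminC]
    rfl

-- ===== VERDICT (by name: the statement is the Claim_ definition above) =====
theorem canonical_track_cid_py_spec : Claim_equal_canonical_track_cid_py := by
  intro track _ hpre
  have h := pvMain (((PySem.Dict.mk track).get? "encodings").getD []) hpre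
  rw [← pvCand_eq] at h
  exact h
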